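-- pv_equiv track=rewrite | github.com/athulcoder/CAMPUSFORGE-ENGINE | backend/resume_worker/extractor/education/education_extraction.py | extract_degree_and_institution
-- ===== SOURCE A (Python) =====
-- def extract_degree_and_institution(lines):
--     degree_keywords = [
--         "bachelor", "b.tech", "btech", "b.tech", "bachelor of technology",
--         "master", "m.tech", "msc", "b.sc", "phd", "mba",
--         "12th", "higher secondary", "hss"
--     ]
--
--     degree = None
--     institution = None
--
--     for line in lines:
--         lower = line.lower()
--
--         if not degree and any(k in lower for k in degree_keywords):
--             degree = line
--
--         if not institution and any(k in lower for k in ["college", "school", "institute", "university", "hss"]):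
--             institution = line
--
--     return degree, institution
-- ===== SOURCE B (Python) =====
-- def extract_degree_and_institution(lines):
--     lines = list(lines)
--     degree_keywords = [
--         "bachelor", "b.tech", "btech", "b.tech", "bachelor of technology",
--         "master", "m.tech", "msc", "b.sc", "phd", "mba",
--         "12th", "higher secondary", "hss"
--     ]
--     institution_keywords = ["college", "school", "institute", "university", "hss"]
--     degree = next((line for line in lines
--                    if any(k in line.lower() for k in degree_keywords)), None)
--     institution = next((line for line in lines
--                         if any(k in line.lower() for k in institution_keywords)), None)
--     return degree, institution
-- ===== Notes on version B (the rewrite author's own statement) =====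
-- stated objective: alternative
-- what changed: Replaces the single combined loop maintaining two running flags by two independent short-circuiting first-match scans (one per keyword list) over the materialised line list.
import Mathlib
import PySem

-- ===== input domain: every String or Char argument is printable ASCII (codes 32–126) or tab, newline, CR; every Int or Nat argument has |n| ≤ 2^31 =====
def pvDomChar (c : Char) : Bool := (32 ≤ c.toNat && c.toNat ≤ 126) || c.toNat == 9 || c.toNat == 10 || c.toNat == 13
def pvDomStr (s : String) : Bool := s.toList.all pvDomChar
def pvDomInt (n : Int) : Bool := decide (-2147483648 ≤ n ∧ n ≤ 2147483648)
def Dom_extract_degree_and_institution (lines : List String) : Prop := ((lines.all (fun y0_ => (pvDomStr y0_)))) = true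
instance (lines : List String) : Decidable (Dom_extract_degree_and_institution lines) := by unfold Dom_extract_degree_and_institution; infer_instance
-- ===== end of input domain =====

-- B replaces A's single combined loop with two running flags by two independent first-match scans, one per keyword list (objective: alternative decomposition; same return value).

-- ===== PORT A =====
def pvDegKeys : List String :=
  ["bachelor", "b.tech", "btech", "b.tech", "bachelor of technology",
   "master", "m.tech", "msc", "b.sc", "phd", "mba",
   "12th", "higher secondary", "hss"]

def pvInstKeys : List String := ["college", "school", "institute", "university", "hss"]

-- Python truthiness of `not degree` on Optional[str]: None and "" are falsy
def pvNotOptStr : Option String → Bool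
  | none => true
  | some s => s == ""

def pvStepA (st : Option String × Option String) (line : String) : Option String × Option String :=
  let lower := PySem.Str.lower line
  let d := if pvNotOptStr st.1 && pvDegKeys.any (fun k => PySem.Str.isIn k lower) then some line else st.1
  let i := if pvNotOptStr st.2 && pvInstKeys.any (fun k => PySem.Str.isIn k lower) then some line else st.2
  (d, i)

def extract_degree_and_institution (lines : List String) : Option String × Option String :=
  lines.foldl pvStepA (none, none)

-- ===== PORT B =====
def pvDegHit (line : String) : Bool := pvDegKeys.any (fun k => PySem.Str.isIn k (PySem.Str.lower line))
def pvInstHit (line : String) : Bool := pvInstKeys.any (fun k => PySem.Str.isIn k (PySem.Str.lower line))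

def extract_degree_and_institution_alt (lines : List String) : Option String × Option String :=
  (lines.find? pvDegHit, lines.find? pvInstHit)

-- ===== PRECONDITION & SPEC =====
def Spec_extract_degree_and_institution (lines : List String) (out : Option String × Option String) : Prop := out = extract_degree_and_institution_alt lines
instance (lines : List String) (out : Option String × Option String) : Decidable (Spec_extract_degree_and_institution lines out) := by unfold Spec_extract_degree_and_institution; infer_instance

-- ===== CLAIM (what is proved, stated in full; the proofs are below) =====
def Claim_equal_extract_degree_and_institution : Prop := ∀ (lines : List String), Dom_extract_degree_and_institution lines → Spec_extract_degree_and_institution lines (extract_degree_and_institution lines)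

-- ===== LEMMAS AND PROOFS =====

-- a line matching a keyword is nonempty (no keyword is a substring of "")
theorem pvDegHit_ne_empty (s : String) (h : pvDegHit s = true) : (s == "") = false := by
  by_contra hc
  have : s = "" := by
    cases hb : (s == "") with
    | false => exact absurd hb hc
    | true => exact (beq_iff_eq).1 hb
  subst this
  simp [pvDegHit, pvDegKeys, PySem.Str.isIn, PySem.Str.lower] at h
  revert h; decide

theorem pvInstHit_ne_empty (s : String) (h : pvInstHit s = true) : (s == "") = false := by
  by_contra hc
  have : s = "" := by
    cases hb : (s == "") with
    | false => exact absurd hb hc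
    | true => exact (beq_iff_eq).1 hb
  subst this
  simp [pvInstHit, pvInstKeys, PySem.Str.isIn, PySem.Str.lower] at h
  revert h; decide

theorem pvLoop_eq (lines : List String) : ∀ (d i : Option String),
    (d = none ∨ ∃ s, d = some s ∧ pvDegHit s = true) →
    (i = none ∨ ∃ s, i = some s ∧ pvInstHit s = true) →
    lines.foldl pvStepA (d, i) = (d.or (lines.find? pvDegHit), i.or (lines.find? pvInstHit)) := by
  induction lines with
  | nil => intro d i _ _; cases d <;> cases i <;> simp
  | cons l t ih =>
    intro d i hd hi
    have hstep : pvStepA (d, i) l =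
        ((if pvNotOptStr d && pvDegHit l then some l else d),
         (if pvNotOptStr i && pvInstHit l then some l else i)) := by
      simp [pvStepA, pvDegHit, pvInstHit]
    have hnd : pvNotOptStr d = d.isNone := by
      rcases hd with h | ⟨s, rfl, hs⟩
      · subst h; rfl
      · simp [pvNotOptStr, pvDegHit_ne_empty s hs]
    have hni : pvNotOptStr i = i.isNone := by
      rcases hi with h | ⟨s, rfl, hs⟩
      · subst h; rfl
      · simp [pvNotOptStr, pvInstHit_ne_empty s hs]
    simp only [List.foldl_cons, hstep, hnd, hni, List.find?]
    cases d with
    | some s =>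
      cases i with
      | some s' => simp only [Option.isNone_some, Bool.false_and]
                   exact ih _ _ hd hi
      | none =>
        cases hil : pvInstHit l with
        | false => simpa [hil] using ih (some s) none hd hi
        | true => simpa [hil] using ih (some s) (some l) hd (Or.inr ⟨l, rfl, hil⟩)
    | none =>
      cases i with
      | some s' =>
        cases hdl : pvDegHit l with
        | false => simpa [hdl] using ih none (some s') hd hi
        | true => simpa [hdl] using ih (some l) (some s') (Or.inr ⟨l, rfl, hdl⟩) hi
      | none =>
        cases hdl : pvDegHit l <;> cases hil : pvInstHit l
        · simpa [hdl, hil] using ih none none hd hi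
        · simpa [hdl, hil] using ih none (some l) hd (Or.inr ⟨l, rfl, hil⟩)
        · simpa [hdl, hil] using ih (some l) none (Or.inr ⟨l, rfl, hdl⟩) hi
        · simpa [hdl, hil] using ih (some l) (some l) (Or.inr ⟨l, rfl, hdl⟩) (Or.inr ⟨l, rfl, hil⟩)

-- ===== VERDICT (by name: the statement is the Claim_ definition above) =====
theorem extract_degree_and_institution_spec : Claim_equal_extract_degree_and_institution := by
  intro lines _
  unfold Spec_extract_degree_and_institution extract_degree_and_institution extract_degree_and_institution_alt
  simpa using pvLoop_eq lines none none (Or.inl rfl) (Or.inl rfl)
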